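-- pv_equiv track=rewrite | github.com/justinbeetle/pyDragonWarrior | GameDialog.py | fix_capitalization
-- ===== SOURCE A (Python) =====
-- def fix_capitalization(message: str) -> str:
--     for punctuation in ['.', '!', '?']:
--         sentences = []
--         for sentence in message.split(punctuation):
--             start_of_sentence_index = len(sentence) - len(sentence.lstrip())
--             if start_of_sentence_index < len(sentence):
--                 sentence = (sentence[0:start_of_sentence_index]
--                             + sentence[start_of_sentence_index].upper()
--                             + sentence[start_of_sentence_index+1:])
--             sentences.append(sentence)
--         message = punctuation.join(sentences)
--     return message
-- ===== SOURCE B (Python) =====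
-- def fix_capitalization(message: str) -> str:
--     out = []
--     capitalize_next = True
--     for ch in message:
--         if ch.isspace():
--             out.append(ch)
--         else:
--             out.append(ch.upper() if capitalize_next else ch)
--             capitalize_next = ch in '.!?'
--     return ''.join(out)
-- ===== Notes on version B (the rewrite author's own statement) =====
-- stated objective: simpler
-- what changed: Replaced A's three split/capitalize-first-of-piece/join passes (one pass per sentence punctuation mark) by a single left-to-right scan that keeps a capitalize_next flag, uppercasing the first non-whitespace character of the message and after every sentence punctuation mark.
import Mathlib
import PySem

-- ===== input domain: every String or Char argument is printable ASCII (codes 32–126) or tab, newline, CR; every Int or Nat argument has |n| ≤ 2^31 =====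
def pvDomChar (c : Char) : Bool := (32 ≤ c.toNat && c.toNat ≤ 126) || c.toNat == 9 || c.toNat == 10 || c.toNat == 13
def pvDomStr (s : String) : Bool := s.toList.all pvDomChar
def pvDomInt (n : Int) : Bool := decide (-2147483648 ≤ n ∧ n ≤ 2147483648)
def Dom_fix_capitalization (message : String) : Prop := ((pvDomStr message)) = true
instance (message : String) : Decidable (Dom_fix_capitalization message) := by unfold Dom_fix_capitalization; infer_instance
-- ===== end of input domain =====

-- B replaces A's three split / capitalize-first-of-piece / join passes by a single
-- left-to-right scan with a capitalize-next flag (objective: simpler, one pass).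

-- ===== PORT A =====
-- A, per punctuation in ['.','!','?']: split the message on it, capitalize the first
-- non-whitespace character of every piece by slicing, and re-join with the punctuation.
def pvCapPiece (sentence : List Char) : List Char :=
  let start_of_sentence_index := sentence.length - (PySem.Chars.lstrip sentence).length
  if start_of_sentence_index < sentence.length then
    PySem.Chars.slice sentence (some 0) (some (start_of_sentence_index : Int))
      ++ PySem.Chars.upper (((PySem.List.pyGet? sentence (start_of_sentence_index : Int)).map ([·])).getD [])
      ++ PySem.Chars.slice sentence (some ((start_of_sentence_index : Int) + 1)) none
  else sentence

def fix_capitalization (message : String) : String :=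
  String.mk (['.', '!', '?'].foldl (fun message punctuation =>
    let sentences := (PySem.Chars.splitOn message [punctuation]).foldl
      (fun sentences sentence => sentences ++ [pvCapPiece sentence]) []
    PySem.Chars.join [punctuation] sentences) message.toList)

-- ===== PORT B =====
-- B: one pass, flag capitalize_next starts true; whitespace passes through, otherwise the
-- char is uppercased when the flag is set and the flag becomes (char in '.!?').
def fix_capitalization_alt (message : String) : String :=
  String.mk ((message.toList.foldl
    (fun (st : List Char × Bool) ch =>
      if PySem.Chars.isspace ch then (st.1 ++ [ch], st.2)
      else ((st.1 ++ [if st.2 then PySem.Chars.upperChar ch else ch]),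
            (ch == '.' || ch == '!' || ch == '?')))
    ([], true)).1)

-- ===== PRECONDITION & SPEC =====
def Spec_fix_capitalization (message : String) (out : String) : Prop := out = fix_capitalization_alt message
instance (message : String) (out : String) : Decidable (Spec_fix_capitalization message out) := by unfold Spec_fix_capitalization; infer_instance

-- ===== CLAIM (what is proved, stated in full; the proofs are below) =====
def Claim_equal_fix_capitalization : Prop := ∀ (message : String), Dom_fix_capitalization message → Spec_fix_capitalization message (fix_capitalization message)

-- ===== LEMMAS AND PROOFS =====

-- the scan both sides reduce to: P tells which chars re-arm the flag
def pvScan (P : Char → Bool) (b : Bool) : List Char → List Char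
  | [] => []
  | c :: t =>
    if PySem.Chars.isspace c then c :: pvScan P b t
    else (if b then PySem.Chars.upperChar c else c) :: pvScan P (P c) t

-- structural split on a single char: (first piece, remaining pieces)
def pvSp (p : Char) : List Char → List Char × List (List Char)
  | [] => ([], [])
  | c :: t =>
    let r := pvSp p t
    if c == p then ([], r.1 :: r.2) else (c :: r.1, r.2)

-- capitalize the first non-whitespace char
def pvCapFirst : List Char → List Char
  | [] => []
  | c :: t => if PySem.Chars.isspace c then c :: pvCapFirst t else PySem.Chars.upperChar c :: t

-- ---- character-level facts ----
theorem pvCharEq (a b : Char) : (a == b) = decide (a.toNat = b.toNat) := by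
  rcases Bool.eq_false_or_eq_true (a == b) with h | h <;> rw [h] <;> symm
  · rw [decide_eq_true_iff]; exact congrArg Char.toNat (eq_of_beq h)
  · rw [decide_eq_false_iff_not]
    intro hn; exact not_eq_of_beq_eq_false h (Char.ext (UInt32.toNat_inj.mp hn))
theorem pvUpper_toNat (c : Char) (h : PySem.Chars.islower c = true) :
    (PySem.Chars.upperChar c).toNat = c.toNat - 32 ∧ 97 ≤ c.toNat ∧ c.toNat ≤ 122 := by
  rw [PySem.Chars.islower, Bool.and_eq_true, decide_eq_true_iff, decide_eq_true_iff] at h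
  obtain ⟨h1, h2⟩ := h
  have h1' : 97 ≤ c.toNat := h1
  have h2' : c.toNat ≤ 122 := h2
  refine ⟨?_, h1', h2'⟩
  rw [PySem.Chars.upperChar, if_pos]
  · have hv : (c.toNat - 32).isValidChar := Or.inl (by omega)
    rw [Char.ofNat, dif_pos hv]; rfl
  · rw [PySem.Chars.islower, Bool.and_eq_true, decide_eq_true_iff, decide_eq_true_iff]
    exact ⟨h1, h2⟩
theorem pvUpper_of_not_lower (c : Char) (h : PySem.Chars.islower c = false) :
    PySem.Chars.upperChar c = c := by
  rw [PySem.Chars.upperChar, if_neg]; rw [h]; exact Bool.false_ne_true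
theorem pvWs_toNat (c : Char) : PySem.Chars.isspace c =
    (decide (c.toNat = 32) || (decide (9 ≤ c.toNat) && decide (c.toNat ≤ 13)) ||
     (decide (28 ≤ c.toNat) && decide (c.toNat ≤ 31)) || decide (c.toNat = 133) ||
     decide (c.toNat = 160) || decide (c.toNat = 5760) ||
     (decide (8192 ≤ c.toNat) && decide (c.toNat ≤ 8202)) || decide (c.toNat = 8232) ||
     decide (c.toNat = 8233) || decide (c.toNat = 8239) || decide (c.toNat = 8287) ||
     decide (c.toNat = 12288)) := rfl
theorem pvWs_of_bounds (c : Char) (h1 : 33 ≤ c.toNat) (h2 : c.toNat ≤ 126) :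
    PySem.Chars.isspace c = false := by
  rw [pvWs_toNat]
  simp only [Bool.or_eq_false_iff, Bool.and_eq_false_iff, decide_eq_false_iff_not]
  omega
theorem pvWs_upper (c : Char) : PySem.Chars.isspace (PySem.Chars.upperChar c) = PySem.Chars.isspace c := by
  rcases Bool.eq_false_or_eq_true (PySem.Chars.islower c) with h | h
  · obtain ⟨hu, h1, h2⟩ := pvUpper_toNat c h
    rw [pvWs_of_bounds c (by omega) (by omega), pvWs_of_bounds _ (by omega) (by omega)]
  · rw [pvUpper_of_not_lower c h]
theorem pvUpper_upper (c : Char) :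
    PySem.Chars.upperChar (PySem.Chars.upperChar c) = PySem.Chars.upperChar c := by
  rcases Bool.eq_false_or_eq_true (PySem.Chars.islower c) with h | h
  swap
  · rw [pvUpper_of_not_lower c h]; rw [pvUpper_of_not_lower c h]
  · obtain ⟨hu, h1, h2⟩ := pvUpper_toNat c h
    apply pvUpper_of_not_lower
    rw [PySem.Chars.islower]
    have : ¬ (97 ≤ (PySem.Chars.upperChar c).toNat) := by omega
    simp only [Bool.and_eq_false_iff, decide_eq_false_iff_not]
    left; intro hc; exact this hc
theorem pvEq_upper (c p : Char) (hp : p.toNat < 65) :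
    (PySem.Chars.upperChar c == p) = (c == p) := by
  rcases Bool.eq_false_or_eq_true (PySem.Chars.islower c) with h | h
  swap
  · rw [pvUpper_of_not_lower c h]
  · obtain ⟨hu, h1, h2⟩ := pvUpper_toNat c h
    rw [pvCharEq, pvCharEq]
    have : (PySem.Chars.upperChar c).toNat ≠ p.toNat := by omega
    have : c.toNat ≠ p.toNat := by omega
    simp_all

theorem pvSplitOn_go (p : Char) (l cur : List Char) (acc : List (List Char)) (fuel : Nat)
    (h : l.length < fuel) :
    PySem.Chars.splitOn.go [p] fuel l cur acc =
      acc.reverse ++ (cur.reverse ++ (pvSp p l).1) :: (pvSp p l).2 := by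
  induction fuel generalizing l cur acc with
  | zero => omega
  | succ n ih =>
    cases l with
    | nil => simp [PySem.Chars.splitOn.go, pvSp]
    | cons c t =>
      rw [PySem.Chars.splitOn.go]
      rcases Bool.eq_false_or_eq_true (c == p) with hc | hc
      · have hpre : [p].isPrefixOf (c :: t) = true := by
          simp [List.isPrefixOf]; exact (eq_of_beq hc).symm
        rw [if_pos hpre]
        simp only [List.length_cons] at h
        have hd : List.drop [p].length (c :: t) = t := by simp
        rw [hd, ih t [] (cur.reverse :: acc) (by omega)]
        simp [pvSp, hc]
      · have hpre : [p].isPrefixOf (c :: t) = false := by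
          simp [List.isPrefixOf]; intro he; rw [he] at hc; simp at hc
        rw [if_neg (by rw [hpre]; exact Bool.false_ne_true)]
        simp only [List.length_cons] at h
        rw [ih t (c :: cur) acc (by omega)]
        simp [pvSp, hc]

theorem pvSplitOn_single (p : Char) (l : List Char) :
    PySem.Chars.splitOn l [p] = (pvSp p l).1 :: (pvSp p l).2 := by
  rw [PySem.Chars.splitOn, pvSplitOn_go p l [] [] (l.length + 1) (by omega)]
  simp

theorem pvLstrip_le (l : List Char) : (PySem.Chars.lstrip l).length ≤ l.length := by
  rw [PySem.Chars.lstrip]; exact List.length_dropWhile_le _ _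

theorem pvCapPiece_eq (s : List Char) : pvCapPiece s = pvCapFirst s := by
  induction s with
  | nil => rfl
  | cons c t ih =>
    rcases Bool.eq_false_or_eq_true (PySem.Chars.isspace c) with hw | hw
    · -- whitespace head
      have hl : PySem.Chars.lstrip (c :: t) = PySem.Chars.lstrip t := by
        rw [PySem.Chars.lstrip, List.dropWhile, hw]; rfl
      have hle := pvLstrip_le t
      rw [pvCapPiece, hl]
      rw [pvCapFirst, if_pos hw, ← ih, pvCapPiece]
      by_cases hc : t.length - (PySem.Chars.lstrip t).length < t.length
      · have hc' : (c :: t).length - (PySem.Chars.lstrip t).length < (c :: t).length := by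
          simp only [List.length_cons]; omega
        rw [if_pos hc, if_pos hc']
        set i := t.length - (PySem.Chars.lstrip t).length with hi
        have h1 : (c :: t).length - (PySem.Chars.lstrip t).length = i + 1 := by
          simp only [List.length_cons]; omega
        rw [h1]
        simp only [PySem.Chars.slice_eq_listSlice]
        have e1 : PySem.List.slice (c :: t) (some 0) (some ((i+1 : Nat) : Int)) =
            c :: PySem.List.slice t (some 0) (some ((i : Nat) : Int)) := by
          rw [PySem.List.slice_toNat _ (le_refl 0) (by positivity),
              PySem.List.slice_toNat _ (le_refl 0) (by positivity)]
          have : ((i+1 : Nat) : Int).toNat = i + 1 := by omega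
          have : ((i : Nat) : Int).toNat = i := by omega
          simp_all [List.take_succ_cons]
        have e2 : PySem.List.pyGet? (c :: t) ((i+1 : Nat) : Int) = PySem.List.pyGet? t ((i : Nat) : Int) := by
          rw [PySem.List.pyGet?_natCast, PySem.List.pyGet?_natCast]
          simp
        have e3 : PySem.List.slice (c :: t) (some (((i+1 : Nat) : Int) + 1)) none =
            PySem.List.slice t (some (((i : Nat) : Int) + 1)) none := by
          rw [PySem.List.slice_from _ (by positivity), PySem.List.slice_from _ (by positivity)]
          have g1 : (((i+1 : Nat) : Int) + 1).toNat = i + 2 := by omega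
          have g2 : (((i : Nat) : Int) + 1).toNat = i + 1 := by omega
          rw [g1, g2]
          rfl
        rw [e1, e2, e3]
        simp
      · have hc' : ¬ ((c :: t).length - (PySem.Chars.lstrip t).length < (c :: t).length) := by
          simp only [List.length_cons]; omega
        rw [if_neg hc, if_neg hc']
    · -- non-whitespace head
      have hl : PySem.Chars.lstrip (c :: t) = c :: t := by
        rw [PySem.Chars.lstrip, List.dropWhile, hw]
      rw [pvCapPiece, hl]
      simp only [Nat.sub_self, List.length_cons]
      rw [if_pos (by omega)]
      rw [pvCapFirst, if_neg (by rw [hw]; exact Bool.false_ne_true)]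
      simp only [PySem.Chars.slice_eq_listSlice]
      rw [PySem.List.slice_toNat _ (le_refl 0) (by positivity)]
      rw [PySem.List.slice_from _ (by positivity)]
      rw [PySem.List.pyGet?_natCast]
      have g1 : (((0 : Nat) : Int)).toNat = 0 := by omega
      have g2 : (((0 : Nat) : Int) + 1).toNat = 1 := by omega
      rw [g1, g2]
      simp [PySem.Chars.upper]
theorem pvFoldl_map (f : List Char → List Char) (pieces acc : List (List Char)) :
    pieces.foldl (fun acc s => acc ++ [f s]) acc = acc ++ pieces.map f := by
  induction pieces generalizing acc with
  | nil => simp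
  | cons h t ih => simp [List.foldl, ih]

theorem pvJoin_cons_head (p x : Char) (h : List Char) (rest : List (List Char)) :
    PySem.Chars.join [p] ((x :: h) :: rest) = x :: PySem.Chars.join [p] (h :: rest) := by
  cases rest <;> simp [PySem.Chars.join, List.intercalate, List.intersperse]

theorem pvJoin_nil_head (p : Char) (h : List Char) (rest : List (List Char)) :
    PySem.Chars.join [p] ([] :: h :: rest) = p :: PySem.Chars.join [p] (h :: rest) := by
  cases rest <;> simp [PySem.Chars.join, List.intercalate, List.intersperse]

theorem pvPass_eq_scan (p : Char) (hwp : PySem.Chars.isspace p = false)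
    (hup : PySem.Chars.upperChar p = p) (l : List Char) (b : Bool) :
    PySem.Chars.join [p]
        ((if b then pvCapFirst (pvSp p l).1 else (pvSp p l).1) :: ((pvSp p l).2).map pvCapFirst) =
      pvScan (· == p) b l := by
  induction l generalizing b with
  | nil =>
    cases b <;> simp [pvSp, pvScan, pvCapFirst, PySem.Chars.join, List.intercalate]
  | cons c t ih =>
    rcases Bool.eq_false_or_eq_true (c == p) with hc | hc
    · -- c = p : piece boundary
      have hcp : c = p := eq_of_beq hc
      have hsp : pvSp p (c :: t) = ([], (pvSp p t).1 :: (pvSp p t).2) := by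
        rw [pvSp, if_pos hc]
      rw [hsp]
      have hcap : (if b then pvCapFirst [] else ([] : List Char)) = [] := by cases b <;> rfl
      simp only [hcap, List.map_cons]
      rw [pvJoin_nil_head]
      rw [show pvCapFirst (pvSp p t).1 :: List.map pvCapFirst (pvSp p t).2 =
            (if true then pvCapFirst (pvSp p t).1 else (pvSp p t).1) :: List.map pvCapFirst (pvSp p t).2
          from rfl]
      rw [ih true]
      rw [pvScan, if_neg (by rw [hcp, hwp]; exact Bool.false_ne_true), hc]
      cases b <;> simp [hcp, hup]
    · -- c ≠ p
      have hsp : pvSp p (c :: t) = (c :: (pvSp p t).1, (pvSp p t).2) := by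
        rw [pvSp, if_neg (by rw [hc]; exact Bool.false_ne_true)]
      rw [hsp]
      rcases Bool.eq_false_or_eq_true (PySem.Chars.isspace c) with hw | hw
      · -- whitespace head of first piece
        have hcap : (if b then pvCapFirst (c :: (pvSp p t).1) else c :: (pvSp p t).1) =
            c :: (if b then pvCapFirst (pvSp p t).1 else (pvSp p t).1) := by
          cases b
          · rfl
          · rw [if_pos rfl, if_pos rfl, pvCapFirst, if_pos hw]
        rw [hcap, pvJoin_cons_head, ih b, pvScan, if_pos hw]
      · -- plain char: flag drops to false
        have hcap : (if b then pvCapFirst (c :: (pvSp p t).1) else c :: (pvSp p t).1) =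
            (if b then PySem.Chars.upperChar c else c) :: (pvSp p t).1 := by
          cases b
          · rfl
          · rw [if_pos rfl, if_pos rfl, pvCapFirst,
                if_neg (by rw [hw]; exact Bool.false_ne_true)]
        rw [hcap, pvJoin_cons_head]
        rw [show (pvSp p t).1 :: List.map pvCapFirst (pvSp p t).2 =
              (if false then pvCapFirst (pvSp p t).1 else (pvSp p t).1) :: List.map pvCapFirst (pvSp p t).2
            from rfl]
        rw [ih false]
        simp [pvScan, hw, hc]

theorem pvScan_compose (p : Char) (hp : p.toNat < 65) (P : Char → Bool)
    (l : List Char) (b1 b2 : Bool) :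
    pvScan (· == p) b1 (pvScan P b2 l) = pvScan (fun c => c == p || P c) (b1 || b2) l := by
  induction l generalizing b1 b2 with
  | nil => rfl
  | cons c t ih =>
    rcases Bool.eq_false_or_eq_true (PySem.Chars.isspace c) with hw | hw
    · rw [pvScan, if_pos hw, pvScan, if_pos hw, pvScan, if_pos hw, ih]
    · rw [pvScan, if_neg (show ¬(PySem.Chars.isspace c = true) by rw [hw]; exact Bool.false_ne_true)]
      have hwd : PySem.Chars.isspace (if b2 then PySem.Chars.upperChar c else c) = false := by
        cases b2
        · exact hw
        · rw [if_pos rfl, pvWs_upper]; exact hw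
      rw [pvScan, if_neg (show ¬(PySem.Chars.isspace (if b2 then PySem.Chars.upperChar c else c) = true) by rw [hwd]; exact Bool.false_ne_true)]
      rw [pvScan, if_neg (show ¬(PySem.Chars.isspace c = true) by rw [hw]; exact Bool.false_ne_true)]
      have hd1 : (if b1 then PySem.Chars.upperChar (if b2 then PySem.Chars.upperChar c else c)
            else (if b2 then PySem.Chars.upperChar c else c)) =
          (if (b1 || b2) then PySem.Chars.upperChar c else c) := by
        cases b1 <;> cases b2 <;> simp [pvUpper_upper]
      have hd2 : ((if b2 then PySem.Chars.upperChar c else c) == p) = (c == p) := by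
        cases b2
        · rfl
        · rw [if_pos rfl, pvEq_upper c p hp]
      rw [hd1, hd2, ih]

theorem pvScan_congr (P Q : Char → Bool) (h : ∀ c, P c = Q c) (b : Bool) (l : List Char) :
    pvScan P b l = pvScan Q b l := by
  induction l generalizing b with
  | nil => rfl
  | cons c t ih =>
    rw [pvScan, pvScan, h c, ih, ih]

theorem pvFoldlB_eq_scan (l acc : List Char) (b : Bool) :
    (l.foldl (fun (st : List Char × Bool) ch =>
        if PySem.Chars.isspace ch then (st.1 ++ [ch], st.2)
        else ((st.1 ++ [if st.2 then PySem.Chars.upperChar ch else ch]),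
              (ch == '.' || ch == '!' || ch == '?'))) (acc, b)).1 =
      acc ++ pvScan (fun c => c == '.' || c == '!' || c == '?') b l := by
  induction l generalizing acc b with
  | nil => simp [pvScan]
  | cons c t ih =>
    rcases Bool.eq_false_or_eq_true (PySem.Chars.isspace c) with hw | hw
    · rw [List.foldl_cons, if_pos hw, ih, pvScan, if_pos hw]
      simp
    · rw [List.foldl_cons,
          if_neg (show ¬(PySem.Chars.isspace c = true) by rw [hw]; exact Bool.false_ne_true),
          ih, pvScan,
          if_neg (show ¬(PySem.Chars.isspace c = true) by rw [hw]; exact Bool.false_ne_true)]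
      simp

-- ---- assembling the passes ----
theorem pvStep_eq_scan (p : Char) (hwp : PySem.Chars.isspace p = false)
    (hup : PySem.Chars.upperChar p = p) (m : List Char) :
    PySem.Chars.join [p]
        ((PySem.Chars.splitOn m [p]).foldl (fun acc s => acc ++ [pvCapPiece s]) []) =
      pvScan (· == p) true m := by
  rw [pvFoldl_map, List.nil_append, pvSplitOn_single, List.map_cons]
  have hmap : ∀ xs : List (List Char), xs.map pvCapPiece = xs.map pvCapFirst :=
    fun xs => List.map_congr_left (fun s _ => pvCapPiece_eq s)
  rw [pvCapPiece_eq, hmap]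
  have := pvPass_eq_scan p hwp hup m true
  rw [if_pos rfl] at this
  exact this

-- ===== VERDICT (by name: the statement is the Claim_ definition above) =====
theorem fix_capitalization_spec : Claim_equal_fix_capitalization := by
  intro message _
  unfold Spec_fix_capitalization fix_capitalization fix_capitalization_alt
  rw [pvFoldlB_eq_scan, List.nil_append]
  apply congrArg String.mk
  rw [List.foldl_cons, List.foldl_cons, List.foldl_cons, List.foldl_nil]
  simp only []
  rw [pvStep_eq_scan '.' (by decide) (by decide),
      pvStep_eq_scan '!' (by decide) (by decide),
      pvStep_eq_scan '?' (by decide) (by decide)]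
  rw [pvScan_compose '!' (by decide) (· == '.') _ true true, Bool.true_or]
  rw [pvScan_compose '?' (by decide) (fun c => c == '!' || c == '.') _ true true, Bool.true_or]
  apply pvScan_congr
  intro c
  cases hd : (c == '.') <;> cases he : (c == '!') <;> cases hf : (c == '?') <;>
    simp [Bool.or_comm]
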